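-- pv_equiv track=rewrite | github.com/DarylMartinDipp/ProjetAAV | src/Knapsack.py | get_dynamic_program_matrix
-- ===== SOURCE A (Python) =====
-- def get_dynamic_program_matrix(weight, data_size, data_list):
--     """
--     Build a matrix with 1 row per dictionary's item & 1 column per unit of knapsack's weight
--     :param weight: the knapsack's capacity
--     :param data_size: the length of the dictionary
--     :param data_list: the dictionary as a list
--     :return: the matrix created
--     """
--     # Initialization of the matrix
--     matrix = [[0 for _ in range(weight + 1)] for _ in range(data_size)]
--
--     # Matrix filling :
--
--     # One loop for the first item
--     for i in range(0, weight + 1):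
--         item_value, item_weight = data_list[0][1]
--         # If the column is "heavy" enough to contain the weight of the first item
--         if item_weight <= i:
--             # The value is put in the matrix, at the right column
--             matrix[0][i] = item_value
--
--     # One loop for the other items
--     for i in range(1, data_size):
--         # One loop per unit of weight + 1
--         for j in range(0, weight + 1):
--             # If the column is not "heavy" enough to contain the weight of the actual item
--             item_value, item_weight = data_list[i][1]
--             if item_weight > j:
--                 # The value of the last item at the same weight's column is put
--                 matrix[i][j] = matrix[i - 1][j]
--             else:
--                 # The maximum value between the last item at the same weight's column
--                 # the value in the previous line at weight's column which can contain the actual item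
--                 matrix[i][j] = max(matrix[i - 1][j], matrix[i - 1][j - item_weight] + item_value)
--     return matrix
-- ===== SOURCE B (Python) =====
-- def get_dynamic_program_matrix(weight, data_size, data_list):
--     """Top-down memoized recursion: solve(i, j) computes one cell on demand,
--     a dict cache keeps it O(data_size * weight); the table is then read out."""
--     memo = {}
--
--     def solve(i, j):
--         if (i, j) in memo:
--             return memo[(i, j)]
--         item_value, item_weight = data_list[i][1]
--         if i == 0:
--             res = item_value if item_weight <= j else 0
--         elif item_weight > j:
--             res = solve(i - 1, j)
--         else:
--             res = max(solve(i - 1, j), solve(i - 1, j - item_weight) + item_value)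
--         memo[(i, j)] = res
--         return res
--
--     return [[solve(i, j) for j in range(weight + 1)] for i in range(data_size)]
-- ===== Notes on version B (the rewrite author's own statement) =====
-- stated objective: alternative
-- what changed: B replaces A's bottom-up in-place fill of a preallocated matrix by top-down memoized recursion: a solve(i, j) function with a dict cache computes each cell from the recurrence on demand, and the result matrix is read out of it.
import Mathlib
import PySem

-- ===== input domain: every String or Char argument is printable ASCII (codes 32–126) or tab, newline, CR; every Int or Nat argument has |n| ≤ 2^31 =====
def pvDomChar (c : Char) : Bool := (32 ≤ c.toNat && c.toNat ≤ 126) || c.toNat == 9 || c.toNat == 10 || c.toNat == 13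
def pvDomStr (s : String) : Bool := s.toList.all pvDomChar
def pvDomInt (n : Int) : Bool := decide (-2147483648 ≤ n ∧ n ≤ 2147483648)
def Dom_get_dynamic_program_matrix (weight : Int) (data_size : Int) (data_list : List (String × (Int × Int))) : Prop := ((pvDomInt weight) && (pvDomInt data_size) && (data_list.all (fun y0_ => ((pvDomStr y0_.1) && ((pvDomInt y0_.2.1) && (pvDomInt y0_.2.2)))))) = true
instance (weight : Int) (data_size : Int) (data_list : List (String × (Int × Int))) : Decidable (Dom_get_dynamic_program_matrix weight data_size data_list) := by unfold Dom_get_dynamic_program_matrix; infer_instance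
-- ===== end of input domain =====

-- B computes the same matrix by top-down memoized recursion (a solve(i, j) helper with a dict
-- cache) instead of A's bottom-up in-place fill of a preallocated matrix; objective: alternative.

-- shared indexing helpers (exact on inputs admitted by Pre_, where every index is in range):
-- `item_value, item_weight = data_list[i][1]`
def pvItem (dl : List (String × (Int × Int))) (i : Int) : Int × Int :=
  ((PySem.List.pyGet? dl i).getD ("", (0, 0))).2
-- `xs[j]` read of an Int cell (in range under Pre_)
def pvRead (xs : List Int) (i : Int) : Int := (PySem.List.pyGet? xs i).getD 0
-- `matrix[i][j]` read
def pvGetM (m : List (List Int)) (i j : Int) : Int := pvRead ((PySem.List.pyGet? m i).getD []) j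
-- `matrix[i][j] = x` (indices are nonnegative and in range under Pre_)
def pvSet (m : List (List Int)) (i j : Int) (x : Int) : List (List Int) :=
  m.modify i.toNat (fun row => row.modify j.toNat (fun _ => x))

-- ===== PORT A =====
def get_dynamic_program_matrix (weight : Int) (data_size : Int) (data_list : List (String × (Int × Int))) : List (List Int) :=
  -- for i in range(1, data_size): for j in range(0, weight + 1): ...   applied to
  (PySem.List.pyRange 1 data_size 1).foldl (fun m i =>
      (PySem.List.pyRange 0 (weight + 1) 1).foldl (fun m j =>
        if j < (pvItem data_list i).2 then
          pvSet m i j (pvGetM m (i - 1) j)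
        else
          pvSet m i j (max (pvGetM m (i - 1) j)
            (pvGetM m (i - 1) (j - (pvItem data_list i).2) + (pvItem data_list i).1))) m)
    -- ... the result of the first-row loop `for i in range(0, weight + 1)` applied to
    ((PySem.List.pyRange 0 (weight + 1) 1).foldl (fun m i =>
        if (pvItem data_list 0).2 ≤ i then pvSet m 0 i (pvItem data_list 0).1 else m)
      -- ... the zero matrix [[0 for _ in range(weight + 1)] for _ in range(data_size)]
      ((PySem.List.pyRange 0 data_size 1).map
        (fun _ => (PySem.List.pyRange 0 (weight + 1) 1).map (fun _ => (0 : Int)))))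

-- ===== PORT B =====
-- `solve(i, j)` with its memo dict, threading the cache through as state. The row index is a
-- Nat (the entry only ever calls solve with i from range(data_size), and the recursion steps
-- i-1 with i > 0, so i is always a nonnegative int in Python; on a negative i Python's solve
-- would never return).
def pvSolve (dl : List (String × (Int × Int))) : Nat → Int → PySem.Dict (Int × Int) Int → Int × PySem.Dict (Int × Int) Int
  | i, j, memo =>
    match PySem.Dict.get? memo ((i : Int), j) with
    | some v => (v, memo)                                  -- if (i, j) in memo: return memo[(i, j)]
    | none =>
      match i with
      | 0 =>                                               -- res = item_value if item_weight <= j else 0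
        let res := if (pvItem dl 0).2 ≤ j then (pvItem dl 0).1 else 0
        (res, memo.insert (((0 : Nat) : Int), j) res)
      | i' + 1 =>
        if j < (pvItem dl ((i' + 1 : Nat) : Int)).2 then   -- elif item_weight > j: res = solve(i - 1, j)
          let p := pvSolve dl i' j memo
          (p.1, p.2.insert (((i' + 1 : Nat) : Int), j) p.1)
        else                                               -- res = max(solve(i-1, j), solve(i-1, j-item_weight) + item_value)
          let p1 := pvSolve dl i' j memo
          let p2 := pvSolve dl i' (j - (pvItem dl ((i' + 1 : Nat) : Int)).2) p1.2
          let res := max p1.1 (p2.1 + (pvItem dl ((i' + 1 : Nat) : Int)).1)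
          (res, p2.2.insert (((i' + 1 : Nat) : Int), j) res)

-- [[solve(i, j) for j in range(weight + 1)] for i in range(data_size)], threading memo
def get_dynamic_program_matrix_alt (weight : Int) (data_size : Int) (data_list : List (String × (Int × Int))) : List (List Int) :=
  ((PySem.List.pyRange 0 data_size 1).foldl (fun acc i =>
      let rowm := (PySem.List.pyRange 0 (weight + 1) 1).foldl (fun racc j =>
          let p := pvSolve data_list i.toNat j racc.2
          (racc.1 ++ [p.1], p.2)) (([] : List Int), acc.2)
      (acc.1 ++ [rowm.1], rowm.2))
    (([] : List (List Int)), (PySem.Dict.empty : PySem.Dict (Int × Int) Int))).1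

-- ===== PRECONDITION & SPEC =====
-- Pre_ excludes exactly the inputs where A raises IndexError: with weight ≥ 0 A needs
-- 1 ≤ data_size ≤ len(data_list) with the weights of items 1..data_size-1 nonnegative
-- (a negative weight there makes `matrix[i - 1][j - item_weight]` index past the row),
-- unless data_size ≤ 0 while item 0 exists and is too heavy for every column, in which
-- case A never writes and returns []. With weight < 0 all loops are empty and A returns.
def Pre_get_dynamic_program_matrix (weight : Int) (data_size : Int) (data_list : List (String × (Int × Int))) : Prop :=
  weight < 0 ∨
  (0 ≤ weight ∧ 1 ≤ data_size ∧ data_size ≤ (data_list.length : Int) ∧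
    ∀ p ∈ (data_list.take data_size.toNat).drop 1, 0 ≤ p.2.2) ∨
  (0 ≤ weight ∧ data_size ≤ 0 ∧ data_list ≠ [] ∧ weight < (pvItem data_list 0).2)

instance (weight : Int) (data_size : Int) (data_list : List (String × (Int × Int))) : Decidable (Pre_get_dynamic_program_matrix weight data_size data_list) := by
  unfold Pre_get_dynamic_program_matrix; infer_instance

def pvWitness_get_dynamic_program_matrix : Int × Int × (List (String × (Int × Int))) :=
  (3, 2, [("a", (4, 2)), ("b", (5, 3))])

def Spec_get_dynamic_program_matrix (weight : Int) (data_size : Int) (data_list : List (String × (Int × Int))) (out : List (List Int)) : Prop := out = get_dynamic_program_matrix_alt weight data_size data_list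
instance (weight : Int) (data_size : Int) (data_list : List (String × (Int × Int))) (out : List (List Int)) : Decidable (Spec_get_dynamic_program_matrix weight data_size data_list out) := by unfold Spec_get_dynamic_program_matrix; infer_instance

-- ===== CLAIM (what is proved, stated in full; the proofs are below) =====
def Claim_equal_get_dynamic_program_matrix : Prop := ∀ (weight : Int) (data_size : Int) (data_list : List (String × (Int × Int))), Dom_get_dynamic_program_matrix weight data_size data_list → Pre_get_dynamic_program_matrix weight data_size data_list → Spec_get_dynamic_program_matrix weight data_size data_list (get_dynamic_program_matrix weight data_size data_list)

-- ===== LEMMAS AND PROOFS =====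

-- the mathematical DP value of cell (i, j), Nat column index (A's side)
def pvDP (dl : List (String × (Int × Int))) : Nat → Nat → Int
  | 0, j => if (pvItem dl 0).2 ≤ (j : Int) then (pvItem dl 0).1 else 0
  | i + 1, j =>
    if (j : Int) < (pvItem dl ((i : Int) + 1)).2 then pvDP dl i j
    else max (pvDP dl i j)
      (pvDP dl i (j - (pvItem dl ((i : Int) + 1)).2.toNat) + (pvItem dl ((i : Int) + 1)).1)

-- the same recurrence with an Int column index — what pvSolve computes (off-grid columns included)
def pvDPZ (dl : List (String × (Int × Int))) : Nat → Int → Int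
  | 0, j => if (pvItem dl 0).2 ≤ j then (pvItem dl 0).1 else 0
  | i + 1, j =>
    if j < (pvItem dl ((i + 1 : Nat) : Int)).2 then pvDPZ dl i j
    else max (pvDPZ dl i j)
      (pvDPZ dl i (j - (pvItem dl ((i + 1 : Nat) : Int)).2) + (pvItem dl ((i + 1 : Nat) : Int)).1)

-- row i of the matrix with the first k cells filled
def pvRowP (dl : List (String × (Int × Int))) (i W k : Nat) : List Int :=
  (List.range W).map (fun j => if j < k then pvDP dl i j else 0)

-- A's matrix state: rows < i done, row i filled up to column k, rows > i zero
def pvMatMid (dl : List (String × (Int × Int))) (N W i k : Nat) : List (List Int) :=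
  (List.range N).map (fun r =>
    if r < i then (List.range W).map (pvDP dl r)
    else if r = i then pvRowP dl i W k
    else (List.range W).map (fun _ => (0 : Int)))

-- the target matrix
def pvTarget (dl : List (String × (Int × Int))) (N W : Nat) : List (List Int) :=
  (List.range N).map (fun i => (List.range W).map (fun j => pvDP dl i j))

theorem pvRange0 (m : Int) : PySem.List.pyRange 0 m 1 = (List.range m.toNat).map (fun k : Nat => (k : Int)) := by
  rw [PySem.List.pyRange_one]; simp

theorem pvRead_map_range {W k : Nat} (f : Nat → Int) (h : k < W) :
    pvRead ((List.range W).map f) (k : Int) = f k := by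
  simp [pvRead, PySem.List.pyGet?_natCast, List.getElem?_map, List.getElem?_range, h]

theorem pvRowP_full (dl : List (String × (Int × Int))) (i W : Nat) :
    pvRowP dl i W W = (List.range W).map (pvDP dl i) := by
  unfold pvRowP; apply List.map_congr_left; intro j hj; simp_all [List.mem_range]

theorem pvRowP_zero (dl : List (String × (Int × Int))) (i W : Nat) :
    pvRowP dl i W 0 = (List.range W).map (fun _ => (0 : Int)) := by
  unfold pvRowP; simp

theorem modify_map_range {α : Type} (f : Nat → α) (N i : Nat) (g : α → α) (h : i < N) :
    ((List.range N).map f).modify i g = (List.range N).map (fun r => if r = i then g (f i) else f r) := by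
  apply List.ext_getElem
  · simp [List.length_modify]
  · intro n h1 h2
    simp only [List.length_modify, List.length_map, List.length_range] at h1
    rw [List.getElem_modify]
    simp only [List.getElem_map, List.getElem_range]
    by_cases hn : i = n
    · simp [hn]
    · have hn' : ¬ n = i := fun h' => hn h'.symm
      simp [hn, hn']

theorem pvRowP_set (dl : List (String × (Int × Int))) (i W k : Nat) (h : k < W) :
    (pvRowP dl i W k).modify k (fun _ => pvDP dl i k) = pvRowP dl i W (k + 1) := by
  unfold pvRowP
  rw [modify_map_range _ _ _ _ h]
  apply List.map_congr_left; intro j hj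
  by_cases hjk : j = k
  · simp [hjk]
  · have h1 : (j < k) = (j < k + 1) := by simp; omega
    simp [hjk, h1]

theorem pvRowP_skip (dl : List (String × (Int × Int))) (i W k : Nat) (h : pvDP dl i k = 0) :
    pvRowP dl i W k = pvRowP dl i W (k + 1) := by
  unfold pvRowP
  apply List.map_congr_left; intro j hj
  by_cases hjk : j = k
  · subst hjk; simp [h]
  · have : (j < k) = (j < k + 1) := by simp; omega
    simp [this]

-- generic: a fold whose steps leave the state unchanged
theorem pvFoldlId {α β : Type} (l : List β) (f : α → β → α) (init : α)
    (h : ∀ a, ∀ b ∈ l, f a b = a) : l.foldl f init = init := by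
  induction l generalizing init with
  | nil => rfl
  | cons x xs ih => simp only [List.foldl_cons, h _ x (by simp)]; exact ih _ (fun a b hb => h a b (by simp [hb]))

-- item r (1 ≤ r < data_size) has nonnegative weight under Pre_
theorem pvPreWeight (dl : List (String × (Int × Int))) (N r : Nat)
    (hpre : ∀ p ∈ (dl.take N).drop 1, 0 ≤ p.2.2) (hr : 1 ≤ r) (hrN : r < N) (hlen : N ≤ dl.length) :
    0 ≤ (pvItem dl (r : Int)).2 := by
  have hrl : r < dl.length := lt_of_lt_of_le hrN hlen
  have h1 : (1 : Nat) ≤ N := le_trans hr (le_of_lt hrN)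
  have hlen2 : r - 1 < ((dl.take N).drop 1).length := by
    simp [List.length_drop, List.length_take]; omega
  have hget : ((dl.take N).drop 1)[r - 1] = dl[r] := by
    rw [List.getElem_drop, List.getElem_take]
    congr 1; omega
  have hmem : dl[r] ∈ (dl.take N).drop 1 := hget ▸ List.getElem_mem hlen2
  have := hpre _ hmem
  simpa [pvItem, PySem.List.pyGet?_natCast, List.getElem?_eq_getElem hrl] using this

theorem pvGetM_matMid (dl : List (String × (Int × Int))) (N W i k r j : Nat)
    (hr : r < i) (hrN : r < N) (hj : j < W) :
    pvGetM (pvMatMid dl N W i k) (r : Int) (j : Int) = pvDP dl r j := by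
  unfold pvGetM pvMatMid
  rw [PySem.List.pyGet?_natCast]
  rw [List.getElem?_map, List.getElem?_range hrN]
  simp only [Option.map_some, Option.getD_some, if_pos hr]
  exact pvRead_map_range _ hj

theorem pvMatMid_set (dl : List (String × (Int × Int))) (N W i k : Nat)
    (hi : i < N) (hk : k < W) :
    pvSet (pvMatMid dl N W i k) (i : Int) (k : Int) (pvDP dl i k) = pvMatMid dl N W i (k + 1) := by
  unfold pvSet pvMatMid
  simp only [Int.toNat_natCast]
  rw [modify_map_range _ _ _ _ hi]
  apply List.map_congr_left; intro r hr
  by_cases hri : r = i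
  · subst hri
    simp only [if_pos rfl, lt_irrefl, if_neg (lt_irrefl r), if_pos rfl]
    exact pvRowP_set dl r W k hk
  · simp [hri]

theorem pvMatMid_next (dl : List (String × (Int × Int))) (N W i : Nat) :
    pvMatMid dl N W i W = pvMatMid dl N W (i + 1) 0 := by
  unfold pvMatMid
  apply List.map_congr_left; intro r hr
  rcases Nat.lt_trichotomy r i with h | h | h
  · simp [h, Nat.lt_succ_of_lt h]
  · subst h
    simp [Nat.lt_succ_self, pvRowP_full]
  · have h1 : ¬ r < i := by omega
    have h2 : ¬ r = i := by omega
    by_cases h3 : r = i + 1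
    · subst h3
      simp [h1, h2, pvRowP_zero]
    · have h4 : ¬ r < i + 1 := by omega
      simp [h1, h2, h3, h4]

theorem pvMatMid_full (dl : List (String × (Int × Int))) (N W : Nat) :
    pvMatMid dl N W N 0 = pvTarget dl N W := by
  unfold pvMatMid pvTarget
  apply List.map_congr_left; intro r hr
  simp [List.mem_range] at hr
  simp [hr]

-- A's first loop
theorem pvLoop1 (dl : List (String × (Int × Int))) (W : Nat) (tail : List (List Int)) (k : Nat) (hk : k ≤ W) :
    ((List.range k).map (fun x : Nat => (x : Int))).foldl
      (fun m i => if (pvItem dl 0).2 ≤ i then pvSet m 0 i (pvItem dl 0).1 else m)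
      (pvRowP dl 0 W 0 :: tail)
    = pvRowP dl 0 W k :: tail := by
  induction k with
  | zero => rfl
  | succ s ih =>
    rw [List.range_succ, List.map_append, List.foldl_append, ih (by omega)]
    simp only [List.map_cons, List.map_nil, List.foldl_cons, List.foldl_nil]
    have hDP : pvDP dl 0 s = if (pvItem dl 0).2 ≤ (s : Int) then (pvItem dl 0).1 else 0 := rfl
    by_cases hc : (pvItem dl 0).2 ≤ (s : Int)
    · rw [if_pos hc]
      have hv : (pvItem dl 0).1 = pvDP dl 0 s := by rw [hDP, if_pos hc]
      rw [hv]
      unfold pvSet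
      simp only [Int.toNat_natCast, Int.toNat_zero]
      have : (pvRowP dl 0 W s :: tail).modify 0 (fun row => row.modify s (fun _ => pvDP dl 0 s))
          = (pvRowP dl 0 W s).modify s (fun _ => pvDP dl 0 s) :: tail := by
        simp [List.modify]
      rw [this, pvRowP_set dl 0 W s (by omega)]
    · rw [if_neg hc]
      have h0 : pvDP dl 0 s = 0 := by rw [hDP, if_neg hc]
      rw [pvRowP_skip dl 0 W s h0]

-- A's inner loop for row s+1
theorem pvLoop2Inner (dl : List (String × (Int × Int))) (N W s : Nat)
    (hs : s + 1 < N) (hw : 0 ≤ (pvItem dl ((s : Int) + 1)).2) (k : Nat) (hk : k ≤ W) :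
    ((List.range k).map (fun x : Nat => (x : Int))).foldl
      (fun m j =>
        if j < (pvItem dl ((s : Int) + 1)).2 then
          pvSet m ((s : Int) + 1) j (pvGetM m ((s : Int) + 1 - 1) j)
        else
          pvSet m ((s : Int) + 1) j (max (pvGetM m ((s : Int) + 1 - 1) j)
            (pvGetM m ((s : Int) + 1 - 1) (j - (pvItem dl ((s : Int) + 1)).2) + (pvItem dl ((s : Int) + 1)).1)))
      (pvMatMid dl N W (s + 1) 0)
    = pvMatMid dl N W (s + 1) k := by
  induction k with
  | zero => rfl
  | succ t ih =>
    rw [List.range_succ, List.map_append, List.foldl_append, ih (by omega)]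
    simp only [List.map_cons, List.map_nil, List.foldl_cons, List.foldl_nil]
    have hcast : ((s : Int) + 1 - 1) = ((s : Nat) : Int) := by omega
    have hcast2 : ((s : Int) + 1) = (((s + 1 : Nat)) : Int) := by push_cast; ring
    have htW : t < W := by omega
    have hsN : s < N := by omega
    have hDP : pvDP dl (s + 1) t =
        if (t : Int) < (pvItem dl ((s : Int) + 1)).2 then pvDP dl s t
        else max (pvDP dl s t)
          (pvDP dl s (t - (pvItem dl ((s : Int) + 1)).2.toNat) + (pvItem dl ((s : Int) + 1)).1) := rfl
    by_cases hc : (t : Int) < (pvItem dl ((s : Int) + 1)).2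
    · rw [if_pos hc]
      rw [hcast, pvGetM_matMid dl N W (s + 1) t s t (by omega) hsN htW]
      have hv : pvDP dl s t = pvDP dl (s + 1) t := by rw [hDP, if_pos hc]
      rw [hv, hcast2, pvMatMid_set dl N W (s + 1) t hs htW]
    · rw [if_neg hc]
      rw [hcast, pvGetM_matMid dl N W (s + 1) t s t (by omega) hsN htW]
      have hsub : (t : Int) - (pvItem dl ((s : Int) + 1)).2
          = (((t - (pvItem dl ((s : Int) + 1)).2.toNat : Nat)) : Int) := by omega
      rw [hsub, pvGetM_matMid dl N W (s + 1) _ s _ (by omega) hsN (by omega)]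
      have hv : max (pvDP dl s t) (pvDP dl s (t - (pvItem dl ((s : Int) + 1)).2.toNat) + (pvItem dl ((s : Int) + 1)).1)
          = pvDP dl (s + 1) t := by rw [hDP, if_neg hc]
      rw [hv, hcast2, pvMatMid_set dl N W (s + 1) t hs htW]

-- A's outer loop over rows 1..N-1
theorem pvLoop2 (dl : List (String × (Int × Int))) (N W : Nat)
    (hN : 1 ≤ N) (hlen : N ≤ dl.length)
    (hpre : ∀ p ∈ (dl.take N).drop 1, 0 ≤ p.2.2) (t : Nat) (ht : t ≤ N - 1) :
    ((List.range t).map (fun k : Nat => 1 + (k : Int))).foldl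
      (fun m i =>
        ((List.range W).map (fun x : Nat => (x : Int))).foldl
          (fun m j =>
            if j < (pvItem dl i).2 then
              pvSet m i j (pvGetM m (i - 1) j)
            else
              pvSet m i j (max (pvGetM m (i - 1) j)
                (pvGetM m (i - 1) (j - (pvItem dl i).2) + (pvItem dl i).1))) m)
      (pvMatMid dl N W 1 0)
    = pvMatMid dl N W (1 + t) 0 := by
  induction t with
  | zero => rfl
  | succ u ih =>
    rw [List.range_succ, List.map_append, List.foldl_append, ih (by omega)]
    simp only [List.map_cons, List.map_nil, List.foldl_cons, List.foldl_nil]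
    have huN : u + 1 < N := by omega
    have hw : 0 ≤ (pvItem dl ((u : Int) + 1)).2 := by
      have := pvPreWeight dl N (u + 1) hpre (by omega) huN hlen
      simpa [Nat.cast_add] using this
    have hcomm : (1 : Int) + (u : Int) = (u : Int) + 1 := by ring
    rw [hcomm]
    have heq : pvMatMid dl N W (1 + u) 0 = pvMatMid dl N W (u + 1) 0 := by rw [Nat.add_comm]
    rw [heq, pvLoop2Inner dl N W u huN hw W (le_refl W), pvMatMid_next]
    congr 1
    omega

-- ---------- B side: soundness of the memoized recursion ----------

-- every cached value is the DP value of its (necessarily Nat-row) key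
def pvSound (dl : List (String × (Int × Int))) (memo : PySem.Dict (Int × Int) Int) : Prop :=
  ∀ (a : Nat) (b : Int) (v : Int), memo.get? ((a : Int), b) = some v → v = pvDPZ dl a b

theorem pvSound_empty (dl : List (String × (Int × Int))) : pvSound dl PySem.Dict.empty := by
  intro a b v h
  simp [PySem.Dict.get?_empty] at h

theorem pvSound_insert (dl : List (String × (Int × Int))) (memo : PySem.Dict (Int × Int) Int)
    (i : Nat) (j : Int) (hS : pvSound dl memo) :
    pvSound dl (memo.insert ((i : Int), j) (pvDPZ dl i j)) := by
  intro a b v h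
  rw [PySem.Dict.get?_insert] at h
  by_cases hk : ((a : Int), b) = ((i : Int), j)
  · rw [if_pos hk] at h
    injection hk with hk1 hk2
    have ha : a = i := by exact_mod_cast hk1
    injection h with h'
    rw [← h', ha, hk2]
  · rw [if_neg hk] at h
    exact hS a b v h

theorem pvSolve_sound (dl : List (String × (Int × Int))) (i : Nat) (j : Int)
    (memo : PySem.Dict (Int × Int) Int) (hS : pvSound dl memo) :
    (pvSolve dl i j memo).1 = pvDPZ dl i j ∧ pvSound dl (pvSolve dl i j memo).2 := by
  induction i generalizing j memo with
  | zero =>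
    rw [pvSolve]
    cases hget : PySem.Dict.get? memo (((0 : Nat) : Int), j) with
    | some v =>
      simp only
      exact ⟨hS 0 j v hget, hS⟩
    | none =>
      simp only
      constructor
      · rfl
      · have : (if (pvItem dl 0).2 ≤ j then (pvItem dl 0).1 else 0) = pvDPZ dl 0 j := rfl
        rw [this]
        exact pvSound_insert dl memo 0 j hS
  | succ i' ih =>
    rw [pvSolve]
    cases hget : PySem.Dict.get? memo (((i' + 1 : Nat) : Int), j) with
    | some v =>
      simp only
      exact ⟨hS (i' + 1) j v hget, hS⟩
    | none =>
      simp only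
      by_cases hc : j < (pvItem dl ((i' + 1 : Nat) : Int)).2
      · rw [if_pos hc]
        obtain ⟨h1, h2⟩ := ih j memo hS
        have hval : (pvSolve dl i' j memo).1 = pvDPZ dl (i' + 1) j := by
          rw [h1]; rw [pvDPZ, if_pos hc]
        constructor
        · exact hval
        · rw [hval]
          exact pvSound_insert dl _ (i' + 1) j h2
      · rw [if_neg hc]
        obtain ⟨h1, h2⟩ := ih j memo hS
        obtain ⟨h3, h4⟩ := ih (j - (pvItem dl ((i' + 1 : Nat) : Int)).2) (pvSolve dl i' j memo).2 h2
        have hval : max (pvSolve dl i' j memo).1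
            ((pvSolve dl i' (j - (pvItem dl ((i' + 1 : Nat) : Int)).2) (pvSolve dl i' j memo).2).1
              + (pvItem dl ((i' + 1 : Nat) : Int)).1) = pvDPZ dl (i' + 1) j := by
          rw [h1, h3]; rw [pvDPZ, if_neg hc]
        constructor
        · exact hval
        · rw [hval]
          exact pvSound_insert dl _ (i' + 1) j h4

-- B's inner fold builds the row of pvDPZ values and keeps the cache sound
theorem pvAltInner (dl : List (String × (Int × Int))) (i : Nat) (js : List Int)
    (r0 : List Int) (m0 : PySem.Dict (Int × Int) Int) (hS : pvSound dl m0) :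
    (js.foldl (fun racc j =>
        ((racc.1 ++ [(pvSolve dl i j racc.2).1], (pvSolve dl i j racc.2).2) : List Int × PySem.Dict (Int × Int) Int))
      (r0, m0)).1 = r0 ++ js.map (pvDPZ dl i)
    ∧ pvSound dl (js.foldl (fun racc j =>
        ((racc.1 ++ [(pvSolve dl i j racc.2).1], (pvSolve dl i j racc.2).2) : List Int × PySem.Dict (Int × Int) Int))
      (r0, m0)).2 := by
  induction js generalizing r0 m0 with
  | nil => simpa using hS
  | cons j js ih =>
    obtain ⟨h1, h2⟩ := pvSolve_sound dl i j m0 hS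
    simp only [List.foldl_cons, List.map_cons]
    obtain ⟨h3, h4⟩ := ih (r0 ++ [(pvSolve dl i j m0).1]) (pvSolve dl i j m0).2 h2
    refine ⟨?_, h4⟩
    rw [h3, h1, List.append_assoc]
    rfl

-- B's outer fold
theorem pvAltOuter (dl : List (String × (Int × Int))) (js : List Int) (is : List Int)
    (rs0 : List (List Int)) (m0 : PySem.Dict (Int × Int) Int) (hS : pvSound dl m0) :
    (is.foldl (fun acc i =>
        let rowm := js.foldl (fun racc j =>
            ((racc.1 ++ [(pvSolve dl i.toNat j racc.2).1], (pvSolve dl i.toNat j racc.2).2) : List Int × PySem.Dict (Int × Int) Int))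
          (([] : List Int), acc.2)
        ((acc.1 ++ [rowm.1], rowm.2) : List (List Int) × PySem.Dict (Int × Int) Int))
      (rs0, m0)).1 = rs0 ++ is.map (fun i => js.map (pvDPZ dl i.toNat)) := by
  induction is generalizing rs0 m0 with
  | nil => simp
  | cons i is ih =>
    obtain ⟨h1, h2⟩ := pvAltInner dl i.toNat js [] m0 hS
    simp only [List.foldl_cons, List.map_cons]
    rw [ih _ _ h2, h1]
    simp [List.append_assoc]

theorem pvAltEq (weight data_size : Int) (dl : List (String × (Int × Int))) :
    get_dynamic_program_matrix_alt weight data_size dl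
      = (PySem.List.pyRange 0 data_size 1).map (fun i =>
          (PySem.List.pyRange 0 (weight + 1) 1).map (pvDPZ dl i.toNat)) := by
  unfold get_dynamic_program_matrix_alt
  have := pvAltOuter dl (PySem.List.pyRange 0 (weight + 1) 1) (PySem.List.pyRange 0 data_size 1)
    [] PySem.Dict.empty (pvSound_empty dl)
  simpa using this

-- bridge: on grid columns with the Pre_-guaranteed nonnegative weights, pvDPZ is pvDP
theorem pvDPZ_eq_pvDP (dl : List (String × (Int × Int))) (N : Nat)
    (hlen : N ≤ dl.length) (hpre : ∀ p ∈ (dl.take N).drop 1, 0 ≤ p.2.2)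
    (i : Nat) (hi : i < N) (j : Nat) :
    pvDPZ dl i (j : Int) = pvDP dl i j := by
  induction i generalizing j with
  | zero => rfl
  | succ i' ih =>
    have hw : 0 ≤ (pvItem dl ((i' + 1 : Nat) : Int)).2 :=
      pvPreWeight dl N (i' + 1) hpre (by omega) hi hlen
    have hc2 : ((i' + 1 : Nat) : Int) = ((i' : Int) + 1) := by push_cast; ring
    have hw' : 0 ≤ (pvItem dl ((i' : Int) + 1)).2 := hc2 ▸ hw
    rw [pvDPZ, pvDP, hc2]
    by_cases hcj : (j : Int) < (pvItem dl ((i' : Int) + 1)).2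
    · rw [if_pos hcj, if_pos hcj]
      exact ih (by omega) j
    · rw [if_neg hcj, if_neg hcj]
      have hsub : (j : Int) - (pvItem dl ((i' : Int) + 1)).2
          = ((j - (pvItem dl ((i' : Int) + 1)).2.toNat : Nat) : Int) := by omega
      rw [hsub, ih (by omega) j, ih (by omega) _]

theorem pvMain (weight data_size : Int) (data_list : List (String × (Int × Int)))
    (hPre : Pre_get_dynamic_program_matrix weight data_size data_list) :
    get_dynamic_program_matrix weight data_size data_list
      = get_dynamic_program_matrix_alt weight data_size data_list := by
  rw [pvAltEq]
  unfold get_dynamic_program_matrix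
  rcases hPre with hneg | ⟨hw, hn1, hnlen, hwts⟩ | ⟨hw, hn0, hdl, hwt0⟩
  · -- weight < 0: every row is empty on both sides
    have h0 : PySem.List.pyRange 0 (weight + 1) 1 = [] := PySem.List.pyRange_one_eq_nil (by omega)
    simp only [h0, List.map_nil, List.foldl_nil]
    exact pvFoldlId _ _ _ (fun a b _ => rfl)
  · -- main case
    set N := data_size.toNat with hN
    set W := (weight + 1).toNat with hW
    have hN1 : 1 ≤ N := by omega
    have hlenN : N ≤ data_list.length := by omega
    have h00 : PySem.List.pyRange 0 (weight + 1) 1 = (List.range W).map (fun k : Nat => (k : Int)) := pvRange0 _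
    have h01 : PySem.List.pyRange 0 data_size 1 = (List.range N).map (fun k : Nat => (k : Int)) := pvRange0 _
    have h1 : PySem.List.pyRange 1 data_size 1 = (List.range (N - 1)).map (fun k : Nat => 1 + (k : Int)) := by
      rw [PySem.List.pyRange_one]
      congr 2
      omega
    simp only [h00, h01, h1]
    have hinit : ((List.range N).map (fun k : Nat => (k : Int))).map
        (fun _ => ((List.range W).map (fun k : Nat => (k : Int))).map (fun _ => (0 : Int)))
        = pvRowP data_list 0 W 0 :: List.replicate (N - 1) ((List.range W).map (fun _ => (0 : Int))) := by
      rw [pvRowP_zero, List.map_const', List.length_map, List.length_range]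
      rw [show N = (N - 1) + 1 by omega, List.replicate_succ]
      simp [List.map_map]
      refine ⟨?_, Or.inr ?_⟩ <;> · rw [show ((fun (_ : Int) => (0:Int)) ∘ fun (k:Nat) => (k:Int)) = (fun _ => (0:Int)) from rfl, List.map_const', List.length_range]
    rw [hinit, pvLoop1 data_list W _ W (le_refl W)]
    have hbridge : pvRowP data_list 0 W W :: List.replicate (N - 1) ((List.range W).map (fun _ => (0 : Int)))
        = pvMatMid data_list N W 1 0 := by
      unfold pvMatMid
      rw [show N = (N - 1) + 1 by omega, List.range_succ_eq_map, List.map_cons, List.map_map]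
      congr 1
      · rw [pvRowP_full]
        simp
      · symm
        have hfun : ∀ r ∈ List.range (N - 1),
            ((fun r => if r < 1 then List.map (pvDP data_list r) (List.range W)
              else if r = 1 then pvRowP data_list 1 W 0
              else (List.range W).map (fun _ => (0 : Int))) ∘ Nat.succ) r
            = (List.range W).map (fun _ => (0 : Int)) := by
          intro r hr
          simp only [Function.comp_apply]
          rw [if_neg (by omega)]
          by_cases h2 : r + 1 = 1
          · rw [if_pos h2, pvRowP_zero]
          · rw [if_neg h2]
        rw [List.map_congr_left hfun, List.map_const', List.length_range]
        simp
    rw [hbridge, pvLoop2 data_list N W hN1 hlenN hwts (N - 1) (le_refl (N - 1))]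
    have hA : pvMatMid data_list N W (1 + (N - 1)) 0 = pvTarget data_list N W := by
      rw [show 1 + (N - 1) = N by omega, pvMatMid_full]
    rw [hA]
    unfold pvTarget
    rw [List.map_map]
    apply List.map_congr_left
    intro i hi
    simp only [List.mem_range] at hi
    rw [Function.comp_apply, List.map_map]
    apply List.map_congr_left
    intro j hj
    simp only [Function.comp_apply, Int.toNat_natCast]
    exact (pvDPZ_eq_pvDP data_list N hlenN hwts i hi j).symm
  · -- data_size ≤ 0 while item 0 is too heavy for every column: both sides are []
    have h0 : PySem.List.pyRange 0 data_size 1 = [] := PySem.List.pyRange_one_eq_nil (by omega)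
    have h1 : PySem.List.pyRange 1 data_size 1 = [] := PySem.List.pyRange_one_eq_nil (by omega)
    simp only [h0, h1, List.map_nil, List.foldl_nil]
    rw [pvFoldlId _ _ _ (fun a b hb => ?_)]
    have hb' := (PySem.List.mem_pyRange_one).1 hb
    rw [if_neg (by omega)]

theorem get_dynamic_program_matrix_spec : Claim_equal_get_dynamic_program_matrix := by
  intro weight data_size data_list _ hPre
  unfold Spec_get_dynamic_program_matrix
  exact pvMain weight data_size data_list hPre
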